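-- pv_equiv track=rewrite | github.com/Thabo08/league-table-standings | main/main.py | league_rankings
-- ===== SOURCE A (Python) =====
-- class RankManager:
--     """Helper class to manage rankings."""
--     def __init__(self):
--         self.current_rank = 0
--         self.previous_rank = 0
--
--     def get_rank(self, same_points=False):
--         self.current_rank += 1
--         if same_points:
--             return self.previous_rank
--         else:
--             self.previous_rank = self.current_rank
--             return self.current_rank
--
-- def _rank_formatter(rank: int, name: str, points: int, carriage_return: bool) -> str:
--     pts = "pt" if points == 1 else "pts"
--     pts = f"{pts}\n" if carriage_return else pts
--     return f"{rank}. {name}, {points} {pts}"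
--
-- def league_rankings(teams_with_points: dict) -> str:
--     if not teams_with_points:
--         raise ValueError("No teams with points found")
--     sorted_teams = sorted(teams_with_points.items(), key=lambda x: x[1])
--     num_teams_placed = len(sorted_teams)
--     rank_manager = RankManager()
--     prev = None
--     ranks = ""
--     for i in range(len(sorted_teams) - 1, -1, -1):
--         name, points = sorted_teams[i]
--         same_points = False
--         if prev is not None:
--             current_team_points = teams_with_points.get(name)
--             prev_team_points = teams_with_points.get(prev)
--             same_points = current_team_points == prev_team_points
--         rank = rank_manager.get_rank(same_points)
--         ranks += _rank_formatter(rank, name, points, num_teams_placed > 1)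
--         prev = name
--         num_teams_placed -= 1
--     return ranks
-- ===== SOURCE B (Python) =====
-- def league_rankings(teams_with_points: dict) -> str:
--     if not teams_with_points:
--         raise ValueError("No teams with points found")
--     ordered = list(reversed(sorted(teams_with_points.items(), key=lambda kv: kv[1])))
--     n = len(ordered)
--     lines = []
--     placed = 0
--     while placed < n:
--         pts = ordered[placed][1]
--         j = placed
--         while j < n and ordered[j][1] == pts:
--             j += 1
--         unit = "pt" if pts == 1 else "pts"
--         for k in range(placed, j):
--             lines.append(f"{placed + 1}. {ordered[k][0]}, {pts} {unit}")
--         placed = j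
--     return "\n".join(lines)
-- ===== Notes on version B (the rewrite author's own statement) =====
-- stated objective: alternative
-- what changed: B replaces A's per-team RankManager state machine (rank decided by comparing dict lookups of the current and previous team names, string += with a countdown-driven trailing-newline flag) by a grouping pass: reverse the ascending sort once, peel off each block of consecutive equal-point teams, give every member rank = index of the block's first member + 1, and '\n'.join the collected lines.
import Mathlib
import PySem

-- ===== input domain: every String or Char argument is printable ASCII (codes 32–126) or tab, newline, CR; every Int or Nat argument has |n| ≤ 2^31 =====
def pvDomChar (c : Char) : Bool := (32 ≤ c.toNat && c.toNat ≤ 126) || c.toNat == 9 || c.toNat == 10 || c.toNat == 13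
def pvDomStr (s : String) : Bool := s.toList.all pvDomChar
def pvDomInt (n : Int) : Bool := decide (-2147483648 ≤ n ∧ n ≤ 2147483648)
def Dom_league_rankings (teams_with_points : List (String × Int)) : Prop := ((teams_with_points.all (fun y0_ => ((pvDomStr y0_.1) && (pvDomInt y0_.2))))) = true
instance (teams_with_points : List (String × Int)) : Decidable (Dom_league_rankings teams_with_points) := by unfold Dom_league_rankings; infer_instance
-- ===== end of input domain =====

-- B replaces A's per-team RankManager/prev-name dict lookups and string += with a
-- grouping pass over the descending order (equal-point block ⇒ one shared rank = index
-- of its first member + 1) joined by "\n"; objective: alternative decomposition.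

-- ===== PORT A =====
-- port of _rank_formatter
def pvRankFormatter (rank : Int) (name : String) (points : Int) (carriage_return : Bool) : String :=
  let pts := if points == 1 then "pt" else "pts"
  let pts := if carriage_return then pts ++ "\n" else pts
  PySem.Int.toStr rank ++ ". " ++ name ++ ", " ++ PySem.Int.toStr points ++ " " ++ pts

-- one iteration of A's loop body; the loop state is
-- (current_rank, previous_rank, prev, ranks, num_teams_placed) — RankManager's two
-- counters threaded through (get_rank inlined: rank/previous_rank update in branch order)
def pvStepA (d : PySem.Dict String Int) (s : Int × Int × Option String × String × Int)
    (t : String × Int) : Int × Int × Option String × String × Int :=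
  let same_points : Bool := match s.2.2.1 with
    | none => false
    | some prev => d.get? t.1 == d.get? prev
  let current_rank := s.1 + 1
  let rank := if same_points then s.2.1 else current_rank
  let previous_rank := if same_points then s.2.1 else current_rank
  (current_rank, previous_rank, some t.1,
   s.2.2.2.1 ++ pvRankFormatter rank t.1 t.2 (decide (s.2.2.2.2 > 1)),
   s.2.2.2.2 - 1)

def league_rankings (teams_with_points : List (String × Int)) : String :=
  let d : PySem.Dict String Int := PySem.Dict.ofList teams_with_points
  -- the Python dict is empty iff the input list is; Python raises ValueError there (outside Pre_)
  if teams_with_points = [] then ""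
  else
    let sorted_teams := PySem.List.sorted d.items (fun x => x.2)
    -- 'for i in range(len(sorted_teams) - 1, -1, -1)' visits exactly sorted_teams.reverse in order
    let st := sorted_teams.reverse.foldl (pvStepA d)
      (0, 0, none, "", (sorted_teams.length : Int))
    st.2.2.2.1

-- ===== PORT B =====
-- B's outer while loop: peel off the block of teams tied with the head's points
-- (inner 'while j < n and ordered[j][1] == pts'), emit its lines at rank placed+1, recurse
def pvGroupLines : List (String × Int) → Nat → List String
  | [], _ => []
  | (name, pts) :: rest, placed =>
    let grp := (name, pts) :: rest.takeWhile (fun q => q.2 == pts)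
    let unit := if pts == 1 then "pt" else "pts"
    grp.map (fun q =>
        PySem.Int.toStr ((placed : Int) + 1) ++ ". " ++ q.1 ++ ", " ++ PySem.Int.toStr pts ++ " " ++ unit)
      ++ pvGroupLines (rest.dropWhile (fun q => q.2 == pts)) (placed + grp.length)
  termination_by l _ => l.length
  decreasing_by simpa using Nat.lt_succ_of_le (List.length_dropWhile_le _ _)

def league_rankings_alt (teams_with_points : List (String × Int)) : String :=
  let d : PySem.Dict String Int := PySem.Dict.ofList teams_with_points
  if teams_with_points = [] then ""
  else
    let ordered := (PySem.List.sorted d.items (fun x => x.2)).reverse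
    PySem.Str.join "\n" (pvGroupLines ordered 0)

-- ===== PRECONDITION & SPEC =====
-- A raises ValueError exactly on the empty input (empty dict); excluded here.
def Pre_league_rankings (teams_with_points : List (String × Int)) : Prop :=
  teams_with_points ≠ []
instance (teams_with_points : List (String × Int)) : Decidable (Pre_league_rankings teams_with_points) := by unfold Pre_league_rankings; infer_instance

def pvWitness_league_rankings : (List (String × Int)) := [("arsenal", 2), ("spurs", 1)]

def Spec_league_rankings (teams_with_points : List (String × Int)) (out : String) : Prop := out = league_rankings_alt teams_with_points
instance (teams_with_points : List (String × Int)) (out : String) : Decidable (Spec_league_rankings teams_with_points out) := by unfold Spec_league_rankings; infer_instance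

-- ===== CLAIM (what is proved, stated in full; the proofs are below) =====
def Claim_equal_league_rankings : Prop := ∀ (teams_with_points : List (String × Int)), Dom_league_rankings teams_with_points → Pre_league_rankings teams_with_points → Spec_league_rankings teams_with_points (league_rankings teams_with_points)

-- ===== LEMMAS AND PROOFS =====

-- the body of one output line, without the trailing-newline decision
def pvCore (rank : Int) (name : String) (pts : Int) : String :=
  PySem.Int.toStr rank ++ ". " ++ name ++ ", " ++ PySem.Int.toStr pts ++ " " ++ (if pts == 1 then "pt" else "pts")

-- A's loop, re-expressed as the list of line bodies it emits (dict lookups already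
-- resolved to the previous element's points)
def pvACores : List (String × Int) → Int → Int → Option Int → List String
  | [], _, _, _ => []
  | (nm, pts) :: rest, c, r, prevPts =>
    let same : Bool := match prevPts with
      | none => false
      | some pp => pts == pp
    pvCore (if same then r else c + 1) nm pts ::
      pvACores rest (c + 1) (if same then r else c + 1) (some pts)

lemma pvRankFormatter_false (rank : Int) (nm : String) (pts : Int) :
    pvRankFormatter rank nm pts false = pvCore rank nm pts := rfl

lemma pvRankFormatter_true (rank : Int) (nm : String) (pts : Int) :
    pvRankFormatter rank nm pts true = pvCore rank nm pts ++ "\n" := by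
  simp [pvRankFormatter, pvCore, String.append_assoc]

lemma pvJoin_nil : PySem.Str.join "\n" [] = "" := by
  simp [PySem.Str.join, PySem.Chars.join_nil]

lemma pvJoin_singleton (a : String) : PySem.Str.join "\n" [a] = a := by
  simp [PySem.Str.join, PySem.Chars.join_singleton]

lemma pvJoin_cons_cons (a b : String) (t : List String) :
    PySem.Str.join "\n" (a :: b :: t) = a ++ "\n" ++ PySem.Str.join "\n" (b :: t) := by
  simp only [PySem.Str.join, List.map_cons, PySem.Chars.join_cons_cons,
    String.ofList_append, String.ofList_toList]

lemma pvHead_dropWhile {α : Type} (p : α → Bool) (l : List α) (x : α) (xs : List α)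
    (h : l.dropWhile p = x :: xs) : p x = false := by
  induction l with
  | nil => simp at h
  | cons a t ih =>
    rw [List.dropWhile_cons] at h
    by_cases hpa : p a = true
    · rw [if_pos hpa] at h; exact ih h
    · rw [if_neg hpa] at h
      obtain ⟨rfl, -⟩ := List.cons.inj h
      simpa using hpa

-- A's fold produces R ++ the "\n"-join of its line bodies
lemma pvFoldA_eq_join (d : PySem.Dict String Int) :
    ∀ (L : List (String × Int)), (∀ q ∈ L, d.get? q.1 = some q.2) →
    ∀ (c r : Int) (R : String) (prev : Option (String × Int)),
      (∀ pp ∈ prev, d.get? pp.1 = some pp.2) →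
      (L.foldl (pvStepA d) (c, r, prev.map (·.1), R, (L.length : Int))).2.2.2.1
        = R ++ PySem.Str.join "\n" (pvACores L c r (prev.map (·.2))) := by
  intro L
  induction L with
  | nil =>
    intro _ c r R prev _
    simp [pvACores, pvJoin_nil]
  | cons x rest ih =>
    intro hmem c r R prev hprev
    obtain ⟨nm, pts⟩ := x
    have hx : d.get? nm = some pts := hmem (nm, pts) (by simp)
    have hsame : (match Option.map (fun p => p.1) prev with
        | none => false | some pv => d.get? nm == d.get? pv)
        = (match Option.map (fun p => p.2) prev with
        | none => false | some pp => pts == pp) := by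
      cases prev with
      | none => rfl
      | some pp => simp [hx, hprev pp rfl]
    cases rest with
    | nil =>
      simp only [List.foldl_cons, List.foldl_nil, pvStepA, hsame]
      simp [pvACores, pvJoin_singleton, pvRankFormatter_false]
    | cons y t =>
      have hgt : (decide ((((nm, pts) :: y :: t : List (String × Int)).length : Int) > 1)) = true := by
        rw [decide_eq_true_eq]
        simp only [List.length_cons]
        push_cast
        omega
      have hlen : (((nm, pts) :: y :: t : List (String × Int)).length : Int) - 1
          = ((y :: t : List (String × Int)).length : Int) := by
        simp only [List.length_cons]
        push_cast
        ring
      rw [List.foldl_cons]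
      have hstep : pvStepA d (c, r, Option.map (fun p => p.1) prev, R,
            (((nm, pts) :: y :: t : List (String × Int)).length : Int)) (nm, pts)
          = (c + 1,
             (if (match Option.map (fun p => p.2) prev with | none => false | some pp => pts == pp) then r else c + 1),
             some nm,
             R ++ (pvCore (if (match Option.map (fun p => p.2) prev with | none => false | some pp => pts == pp) then r else c + 1) nm pts ++ "\n"),
             ((y :: t : List (String × Int)).length : Int)) := by
        simp only [pvStepA, hsame, hgt, pvRankFormatter_true, hlen]
      rw [hstep]
      have hih := ih (fun q hq => hmem q (List.mem_cons_of_mem _ hq)) (c + 1)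
        (if (match Option.map (fun p => p.2) prev with | none => false | some pp => pts == pp) then r else c + 1)
        (R ++ (pvCore (if (match Option.map (fun p => p.2) prev with | none => false | some pp => pts == pp) then r else c + 1) nm pts ++ "\n"))
        (some (nm, pts)) (by intro pp hpp; simp at hpp; subst hpp; exact hx)
      simp only [Option.map_some] at hih
      rw [hih]
      have hexp : pvACores ((nm, pts) :: y :: t) c r (Option.map (fun p => p.2) prev)
          = pvCore (if (match Option.map (fun p => p.2) prev with | none => false | some pp => pts == pp) then r else c + 1) nm pts ::
            pvACores (y :: t) (c + 1)
              (if (match Option.map (fun p => p.2) prev with | none => false | some pp => pts == pp) then r else c + 1)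
              (some pts) := by
        simp [pvACores]
      rw [hexp]
      have hcons : ∃ z zs, pvACores (y :: t) (c + 1)
          (if (match Option.map (fun p => p.2) prev with | none => false | some pp => pts == pp) then r else c + 1)
          (some pts) = z :: zs := by
        obtain ⟨yn, yp⟩ := y
        exact ⟨_, _, rfl⟩
      obtain ⟨z, zs, hz⟩ := hcons
      rw [hz, pvJoin_cons_cons]
      simp [String.append_assoc]

-- inside a tied block every element gets the block's rank
lemma pvACores_run (pts : Int) (r0 : Int) :
    ∀ (t : List (String × Int)), (∀ q ∈ t, q.2 = pts) →
    ∀ (rest' : List (String × Int)) (c : Int),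
      pvACores (t ++ rest') c r0 (some pts)
        = t.map (fun q => pvCore r0 q.1 q.2) ++ pvACores rest' (c + t.length) r0 (some pts) := by
  intro t
  induction t with
  | nil => intro _ rest' c; simp
  | cons q tq ih =>
    intro hq rest' c
    obtain ⟨qn, qp⟩ := q
    have hqp : qp = pts := hq (qn, qp) (by simp)
    subst hqp
    have hc : c + 1 + ((tq.length : Nat) : Int) = c + (((tq.length + 1 : Nat)) : Int) := by
      push_cast; ring
    simp only [List.cons_append, pvACores, beq_self_eq_true, if_true, List.map_cons,
      List.length_cons]
    rw [ih (fun a ha => hq a (List.mem_cons_of_mem _ ha)) rest' (c + 1), hc]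

-- A's line bodies are exactly B's grouped lines
lemma pvACores_eq_groups :
    ∀ (n : Nat) (L : List (String × Int)), L.length ≤ n →
    ∀ (k : Nat) (r : Int) (p : Option Int),
      (∀ hd, L.head? = some hd → ∀ pp, p = some pp → hd.2 ≠ pp) →
      pvACores L (k : Int) r p = pvGroupLines L k := by
  intro n
  induction n with
  | zero =>
    intro L hL k r p _
    rw [Nat.le_zero, List.length_eq_zero_iff] at hL
    subst hL
    simp [pvACores, pvGroupLines]
  | succ n ihn =>
    intro L hL k r p hp
    cases L with
    | nil => simp [pvACores, pvGroupLines]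
    | cons x rest =>
      obtain ⟨nm, pts⟩ := x
      have hsplit : rest = rest.takeWhile (fun q => q.2 == pts) ++ rest.dropWhile (fun q => q.2 == pts) :=
        (List.takeWhile_append_dropWhile).symm
      have htw : ∀ q ∈ rest.takeWhile (fun q => q.2 == pts), q.2 = pts := by
        intro q hq
        have := List.mem_takeWhile_imp hq
        simpa using this
      have hlen' : (rest.dropWhile (fun q => q.2 == pts)).length ≤ n := by
        have h1 := List.length_dropWhile_le (fun q => q.2 == pts) rest
        simp only [List.length_cons] at hL
        omega
      have hbound : ∀ hd, (rest.dropWhile (fun q => q.2 == pts)).head? = some hd →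
          ∀ pp, (some pts : Option Int) = some pp → hd.2 ≠ pp := by
        intro hd hhd pp hpp
        obtain rfl : pts = pp := by injection hpp
        cases hdw : rest.dropWhile (fun q => q.2 == pts) with
        | nil => rw [hdw] at hhd; simp at hhd
        | cons z zs =>
          have hfalse := pvHead_dropWhile (fun q => q.2 == pts) rest z zs hdw
          rw [hdw] at hhd
          simp only [List.head?_cons, Option.some.injEq] at hhd
          subst hhd
          simpa using hfalse
      have hcast : ((k : Int) + 1) + ((rest.takeWhile (fun q => q.2 == pts)).length : Int)
          = (((k + ((rest.takeWhile (fun q => q.2 == pts)).length + 1) : Nat)) : Int) := by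
        push_cast; ring
      -- unfold one step of pvACores; the head starts a new block (p misses its points)
      have hA : pvACores ((nm, pts) :: rest) (k : Int) r p
          = pvCore ((k : Int) + 1) nm pts :: pvACores rest ((k : Int) + 1) ((k : Int) + 1) (some pts) := by
        cases p with
        | none => simp [pvACores]
        | some pp =>
          have hne : (pts == pp) = false := by
            simpa using hp (nm, pts) rfl pp rfl
          simp [pvACores, hne]
      rw [hA]
      conv_lhs =>
        rw [hsplit, pvACores_run pts ((k : Int) + 1) _ htw _ ((k : Int) + 1)]
      rw [hcast,
        ihn (rest.dropWhile (fun q => q.2 == pts)) hlen' (k + ((rest.takeWhile (fun q => q.2 == pts)).length + 1)) ((k : Int) + 1) (some pts) hbound]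
      -- unfold one step of pvGroupLines
      rw [pvGroupLines]
      simp only [List.map_cons, List.length_cons, List.cons_append]
      congr 1
      simp only [pvCore]
      simp only [List.append_cancel_right_eq, List.map_inj_left]
      intro a hq
      rw [htw a hq]

-- ===== VERDICT (by name: the statement is the Claim_ definition above) =====
theorem league_rankings_spec : Claim_equal_league_rankings := by
  unfold Claim_equal_league_rankings
  intro twp _ hpre
  unfold Pre_league_rankings at hpre
  unfold Spec_league_rankings league_rankings league_rankings_alt
  simp only [if_neg hpre]
  have hmem : ∀ q ∈ (PySem.List.sorted (PySem.Dict.ofList twp).items (fun x => x.2)).reverse,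
      (PySem.Dict.ofList twp).get? q.1 = some q.2 := by
    intro q hq
    rw [List.mem_reverse, PySem.List.mem_sorted] at hq
    exact PySem.Dict.get?_of_mem_items _ hq (PySem.Dict.nodup_keys_ofList twp)
  have h1 := pvFoldA_eq_join (PySem.Dict.ofList twp)
    (PySem.List.sorted (PySem.Dict.ofList twp).items (fun x => x.2)).reverse hmem
    0 0 "" none (by intro pp h; cases h)
  simp only [Option.map_none, List.length_reverse] at h1
  rw [h1, String.empty_append]
  congr 1
  have := pvACores_eq_groups
    ((PySem.List.sorted (PySem.Dict.ofList twp).items (fun x => x.2)).reverse).length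
    (PySem.List.sorted (PySem.Dict.ofList twp).items (fun x => x.2)).reverse le_rfl
    0 0 none (by intro hd _ pp h; cases h)
  simpa using this
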